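-- pv_equiv track=rewrite | github.com/davidkristoffersen/bed-2056_assignments | assignment-6_bankruptcy/src/main.py | convert_scraped_data
-- ===== SOURCE A (Python) =====
-- def convert_scraped_data(scraped):
--     """Convert scraped data"""
--     result = {}
--     for _m in scraped:
--         month = _m[0]
--         for key, val in _m[1].items():
--             if key not in result:
--                 result[key] = [[month], [val]]
--             else:
--                 result[key][0].append(month)
--                 result[key][1].append(val)
--     return result
-- ===== SOURCE B (Python) =====
-- def convert_scraped_data(scraped):
--     """Convert scraped data"""
--     keys = []
--     for _month, sub in scraped:
--         for key in sub:
--             if key not in keys: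
--                 keys.append(key)
--     return {key: [[month for month, sub in scraped if key in sub],
--                   [sub[key] for month, sub in scraped if key in sub]]
--             for key in keys}
-- ===== Notes on version B (the rewrite author's own statement) =====
-- stated objective: alternative
-- what changed: A builds the result dict incrementally, branching per item to grow two parallel lists in place; B first collects the distinct keys in order of first appearance and then, for each key, rescans the whole input with two comprehensions to build its month and value lists.
import Mathlib
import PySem

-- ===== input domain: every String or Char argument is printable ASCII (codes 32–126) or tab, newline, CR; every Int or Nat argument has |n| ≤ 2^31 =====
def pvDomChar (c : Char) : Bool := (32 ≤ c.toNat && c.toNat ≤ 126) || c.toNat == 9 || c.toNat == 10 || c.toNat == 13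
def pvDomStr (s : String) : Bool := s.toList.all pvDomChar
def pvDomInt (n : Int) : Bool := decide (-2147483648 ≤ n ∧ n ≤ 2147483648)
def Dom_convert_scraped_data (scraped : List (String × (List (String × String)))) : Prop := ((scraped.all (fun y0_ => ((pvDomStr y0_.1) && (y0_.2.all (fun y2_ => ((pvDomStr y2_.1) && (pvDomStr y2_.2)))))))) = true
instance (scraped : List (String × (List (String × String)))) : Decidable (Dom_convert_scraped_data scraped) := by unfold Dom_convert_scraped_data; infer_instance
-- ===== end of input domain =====

-- B replaces A's incremental branch-and-append dict build by two staged passes: collect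
-- distinct keys in first-appearance order, then rescan the whole input per key with
-- comprehensions; alternative decomposition, same result, more rescans.


-- ===== PORT A =====
-- inner loop body of A: the 'if key not in result … else append to both lists' branch
def pvStepA (month : String) (result : PySem.Dict String (List (List String)))
    (kv : String × String) : PySem.Dict String (List (List String)) :=
  if result.contains kv.1 = false then
    result.insert kv.1 [[month], [kv.2]]
  else
    match result.get? kv.1 with
    | some [ms, vs] => result.insert kv.1 [ms ++ [month], vs ++ [kv.2]]
    | _ => result   -- unreachable totalisation guard: stored values always have shape [ms, vs]

def convert_scraped_data (scraped : List (String × (List (String × String)))) : List (String × List (List String)) :=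
  (scraped.foldl
    (fun result _m => (PySem.Dict.ofList _m.2).items.foldl (pvStepA _m.1) result)
    PySem.Dict.empty).items

-- ===== PORT B =====
-- 'if key not in keys: keys.append(key)'
def pvAddKey (ks : List String) (k : String) : List String :=
  if ks.contains k then ks else ks ++ [k]

-- first pass of B: the distinct keys in order of first appearance
def pvKeysB (scraped : List (String × (List (String × String)))) : List String :=
  scraped.foldl (fun ks m => (PySem.Dict.ofList m.2).keys.foldl pvAddKey ks) []

-- '[month for month, sub in scraped if key in sub]'
def pvMonthsB (scraped : List (String × (List (String × String)))) (k : String) : List String :=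
  (scraped.filter (fun q => (PySem.Dict.ofList q.2).contains k)).map (·.1)

-- '[sub[key] for month, sub in scraped if key in sub]'  (the guard makes sub[key] = get?)
def pvValsB (scraped : List (String × (List (String × String)))) (k : String) : List String :=
  scraped.filterMap (fun q => (PySem.Dict.ofList q.2).get? k)

def convert_scraped_data_alt (scraped : List (String × (List (String × String)))) : List (String × List (List String)) :=
  ((pvKeysB scraped).foldl
    (fun result k => result.insert k [pvMonthsB scraped k, pvValsB scraped k])
    PySem.Dict.empty).items

-- ===== PRECONDITION & SPEC =====
def Spec_convert_scraped_data (scraped : List (String × (List (String × String)))) (out : List (String × List (List String))) : Prop := out = convert_scraped_data_alt scraped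
instance (scraped : List (String × (List (String × String)))) (out : List (String × List (List String))) : Decidable (Spec_convert_scraped_data scraped out) := by unfold Spec_convert_scraped_data; infer_instance

-- ===== CLAIM (what is proved, stated in full; the proofs are below) =====
def Claim_equal_convert_scraped_data : Prop := ∀ (scraped : List (String × (List (String × String)))), Dom_convert_scraped_data scraped → Spec_convert_scraped_data scraped (convert_scraped_data scraped)

-- ===== LEMMAS AND PROOFS =====

-- one month as a list of (month, key, val) triples
def pvTr (m : String × (List (String × String))) : List (String × String × String) :=
  (PySem.Dict.ofList m.2).items.map (fun kv => (m.1, kv.1, kv.2))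

-- the whole input flattened to triples
def pvFlat (s : List (String × (List (String × String)))) : List (String × String × String) :=
  s.flatMap pvTr

def pvStepT (d : PySem.Dict String (List (List String))) (x : String × String × String) :
    PySem.Dict String (List (List String)) :=
  pvStepA x.1 d x.2

def pvKeysT (acc : List String) (t : List (String × String × String)) : List String :=
  t.foldl (fun ks x => pvAddKey ks x.2.1) acc

def pvMonthsT (t : List (String × String × String)) (k : String) : List String :=
  (t.filter (fun x => x.2.1 == k)).map (·.1)

def pvValsT (t : List (String × String × String)) (k : String) : List String :=
  (t.filter (fun x => x.2.1 == k)).map (·.2.2)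

-- canonical form of A's accumulator after processing triples t
def pvCanon (t : List (String × String × String)) : List (String × List (List String)) :=
  (pvKeysT [] t).map (fun k => (k, [pvMonthsT t k, pvValsT t k]))

theorem pvFoldl_flatMap {α β δ : Type} (f : α → List β) (g : δ → β → δ)
    (s : List α) (init : δ) :
    (s.flatMap f).foldl g init = s.foldl (fun d m => (f m).foldl g d) init := by
  induction s generalizing init with
  | nil => rfl
  | cons x t ih => simp [List.flatMap_cons, List.foldl_append, ih]

theorem pvMem_keysT (acc : List String) (t : List (String × String × String)) (k : String) :
    k ∈ pvKeysT acc t ↔ k ∈ acc ∨ k ∈ t.map (·.2.1) := by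
  induction t generalizing acc with
  | nil => simp [pvKeysT]
  | cons x t ih =>
      show k ∈ pvKeysT (pvAddKey acc x.2.1) t ↔ _
      rw [ih]
      unfold pvAddKey
      by_cases h : x.2.1 ∈ acc
      · rw [if_pos (by simpa using h)]
        simp only [List.map_cons, List.mem_cons]
        constructor
        · tauto
        · rintro (h1 | h2 | h3)
          exacts [Or.inl h1, Or.inl (h2 ▸ h), Or.inr h3]
      · rw [if_neg (by simpa using h)]
        simp only [List.mem_append, List.map_cons, List.mem_cons]
        tauto

theorem pvNodup_keysT (acc : List String) (t : List (String × String × String))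
    (h : acc.Nodup) : (pvKeysT acc t).Nodup := by
  induction t generalizing acc with
  | nil => exact h
  | cons x t ih =>
      apply ih
      show (pvAddKey acc x.2.1).Nodup
      unfold pvAddKey
      by_cases hc : x.2.1 ∈ acc
      · rw [if_pos (by simpa using hc)]; exact h
      · rw [if_neg (by simpa using hc)]
        refine List.Nodup.append h (List.nodup_singleton _) ?_
        intro a ha hb
        exact hc ((List.mem_singleton.mp hb) ▸ ha)

theorem pvKeysT_append (acc : List String) (t u : List (String × String × String)) :
    pvKeysT acc (t ++ u) = pvKeysT (pvKeysT acc t) u := by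
  simp [pvKeysT, List.foldl_append]

-- A's fold over triples produces the canonical dict
theorem pvFoldT_canon (t : List (String × String × String)) :
    (t.foldl pvStepT PySem.Dict.empty).items = pvCanon t := by
  induction t using List.reverseRecOn with
  | nil => rfl
  | append_singleton t x ih =>
      rw [List.foldl_append, List.foldl_cons, List.foldl_nil]
      set d := t.foldl pvStepT PySem.Dict.empty with hd
      have hK : pvKeysT [] (t ++ [x]) = pvAddKey (pvKeysT [] t) x.2.1 := by
        rw [pvKeysT_append]; rfl
      have hkeys : d.keys = pvKeysT [] t := by
        simp only [PySem.Dict.keys, ih]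
        unfold pvCanon
        rw [List.map_map]
        exact (List.map_congr_left fun k _ => rfl).trans (List.map_id _)
      have hnd : d.keys.Nodup := by rw [hkeys]; exact pvNodup_keysT [] t List.nodup_nil
      have hcont : d.contains x.2.1 = (pvKeysT [] t).contains x.2.1 := by
        rw [PySem.Dict.contains_eq_decide_mem_keys, hkeys]
        simp
      by_cases hmem : x.2.1 ∈ pvKeysT [] t
      · -- key already present: in-place update of both lists
        have hc : d.contains x.2.1 = true := by
          rw [hcont]; simpa using hmem
        have hitem : (x.2.1, [pvMonthsT t x.2.1, pvValsT t x.2.1]) ∈ d.items := by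
          rw [ih, pvCanon]
          exact List.mem_map.mpr ⟨x.2.1, hmem, rfl⟩
        have hget : d.get? x.2.1 = some [pvMonthsT t x.2.1, pvValsT t x.2.1] :=
          PySem.Dict.get?_of_mem_items d hitem hnd
        show (pvStepA x.1 d x.2).items = pvCanon (t ++ [x])
        unfold pvStepA
        rw [hc]
        simp only [hget, if_neg (by decide : ¬(true = false))]
        rw [PySem.Dict.items_insert_of_contains _ _ hc, ih]
        unfold pvCanon
        rw [hK]
        unfold pvAddKey
        rw [if_pos (by simpa using hmem)]
        rw [List.map_map]
        refine List.map_congr_left (fun k _ => ?_)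
        by_cases hk : k = x.2.1
        · subst hk
          simp [pvMonthsT, pvValsT, List.filter_append]
        · have hbk : (k == x.2.1) = false := by simpa using hk
          have hxk : (x.2.1 == k) = false := by
            simpa using fun h => hk h.symm
          simp [Function.comp, hbk, hxk, pvMonthsT, pvValsT, List.filter_append]
      · -- fresh key: appended with singleton lists
        have hc : d.contains x.2.1 = false := by
          rw [hcont]; simpa using hmem
        have hnotin : x.2.1 ∉ t.map (·.2.1) := fun h =>
          hmem ((pvMem_keysT [] t x.2.1).mpr (Or.inr h))
        have hfilt : t.filter (fun y => y.2.1 == x.2.1) = [] := by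
          rw [List.filter_eq_nil_iff]
          intro a ha hb
          exact hnotin (List.mem_map.mpr ⟨a, ha, by simpa using hb⟩)
        show (pvStepA x.1 d x.2).items = pvCanon (t ++ [x])
        unfold pvStepA
        rw [if_pos hc, PySem.Dict.items_insert_of_not_contains _ _ hc, ih]
        unfold pvCanon
        rw [hK]
        unfold pvAddKey
        rw [if_neg (by simpa using hmem)]
        rw [List.map_append]
        congr 1
        · refine List.map_congr_left (fun k hk => ?_)
          have hne : k ≠ x.2.1 := fun h => hmem (h ▸ hk)
          have hxk : (x.2.1 == k) = false := by
            simpa using fun h => hne h.symm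
          simp [pvMonthsT, pvValsT, List.filter_append, hxk]
        · simp [pvMonthsT, pvValsT, List.filter_append, hfilt]

-- the nested A fold is the fold over the flattened triples
theorem pvA_eq_foldT (scraped : List (String × (List (String × String)))) :
    convert_scraped_data scraped = ((pvFlat scraped).foldl pvStepT PySem.Dict.empty).items := by
  unfold convert_scraped_data pvFlat
  rw [pvFoldl_flatMap]
  have hfun : (fun (d : PySem.Dict String (List (List String))) m => (pvTr m).foldl pvStepT d)
      = (fun result (_m : String × List (String × String)) =>
          (PySem.Dict.ofList _m.2).items.foldl (pvStepA _m.1) result) := by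
    funext d m
    unfold pvTr
    rw [List.foldl_map]
    rfl
  rw [hfun]

-- B's key pass is pvKeysT of the flattened triples
theorem pvKeysB_eq (scraped : List (String × (List (String × String)))) :
    pvKeysB scraped = pvKeysT [] (pvFlat scraped) := by
  unfold pvKeysB pvKeysT pvFlat
  rw [pvFoldl_flatMap]
  have hfun : (fun (ks : List String) m => (pvTr m).foldl (fun ks x => pvAddKey ks x.2.1) ks)
      = (fun ks (m : String × List (String × String)) =>
          (PySem.Dict.ofList m.2).keys.foldl pvAddKey ks) := by
    funext ks m
    unfold pvTr
    rw [List.foldl_map]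
    simp only [PySem.Dict.keys]
    rw [List.foldl_map]
  rw [hfun]

-- pair lists with distinct first components: filter at a key is find? as a list
theorem pvFilter_nodup {β : Type} (l : List (String × β)) (k : String)
    (h : (l.map Prod.fst).Nodup) :
    l.filter (fun p => p.1 == k) =
      match l.find? (fun p => p.1 == k) with
      | some p => [p]
      | none => [] := by
  induction l with
  | nil => rfl
  | cons a l ih =>
      simp only [List.map_cons, List.nodup_cons] at h
      by_cases ha : a.1 = k
      · have hb : (a.1 == k) = true := by simpa using ha
        rw [List.find?_cons_of_pos (p := fun p : String × β => p.1 == k) hb,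
            List.filter_cons_of_pos (p := fun p : String × β => p.1 == k) hb]
        have : l.filter (fun p => p.1 == k) = [] := by
          rw [List.filter_eq_nil_iff]
          intro b hb2 hb3
          have : b.1 = k := by simpa using hb3
          exact h.1 (ha ▸ this ▸ List.mem_map.mpr ⟨b, hb2, rfl⟩)
        rw [this]
      · have hb : (a.1 == k) = false := by simpa using ha
        rw [List.find?_cons_of_neg (p := fun p : String × β => p.1 == k) (by simp [hb]),
            List.filter_cons_of_neg (by simp [hb])]
        exact ih h.2

-- one month's triples filtered at key k: singleton if the month has k, else empty
theorem pvTr_filter (m : String × (List (String × String))) (k : String) :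
    (pvTr m).filter (fun x => x.2.1 == k) =
      match (PySem.Dict.ofList m.2).get? k with
      | some v => [(m.1, k, v)]
      | none => [] := by
  unfold pvTr
  rw [List.filter_map]
  have hnd : ((PySem.Dict.ofList m.2).items.map Prod.fst).Nodup := by
    have := PySem.Dict.nodup_keys_ofList (κ := String) (ν := String) m.2
    simpa [PySem.Dict.keys] using this
  rw [show ((fun x : String × String × String => x.2.1 == k) ∘
        fun kv : String × String => (m.1, kv.1, kv.2)) =
        (fun p : String × String => p.1 == k) from rfl]
  rw [pvFilter_nodup _ k hnd]
  cases hf : (PySem.Dict.ofList m.2).items.find? (fun p => p.1 == k) with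
  | none =>
      have hg : (PySem.Dict.ofList m.2).get? k = none := by
        rw [PySem.Dict.get?_eq_none_iff_not_mem_keys]
        intro hkmem
        simp only [PySem.Dict.keys] at hkmem
        obtain ⟨p, hp, hpk⟩ := List.mem_map.mp hkmem
        have := List.find?_eq_none.mp hf p hp
        simp [hpk] at this
      rw [hg]
      rfl
  | some p =>
      obtain ⟨p1, p2⟩ := p
      have hpk : p1 = k := by simpa using List.find?_some hf
      subst hpk
      have hmemp : (p1, p2) ∈ (PySem.Dict.ofList m.2).items :=
        List.mem_of_find?_eq_some hf
      have hg : (PySem.Dict.ofList m.2).get? p1 = some p2 :=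
        PySem.Dict.get?_of_mem_items _ hmemp (PySem.Dict.nodup_keys_ofList m.2)
      rw [hg]
      rfl

theorem pvMonthsB_eq (scraped : List (String × (List (String × String)))) (k : String) :
    pvMonthsB scraped k = pvMonthsT (pvFlat scraped) k := by
  induction scraped with
  | nil => rfl
  | cons m s ih =>
      unfold pvMonthsB pvMonthsT pvFlat at *
      rw [List.flatMap_cons, List.filter_append, List.map_append, ← ih, pvTr_filter]
      rw [List.filter_cons]
      rw [PySem.Dict.contains_eq_isSome_get?]
      cases hg : (PySem.Dict.ofList m.2).get? k with
      | none => simp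
      | some v => simp

theorem pvValsB_eq (scraped : List (String × (List (String × String)))) (k : String) :
    pvValsB scraped k = pvValsT (pvFlat scraped) k := by
  induction scraped with
  | nil => rfl
  | cons m s ih =>
      unfold pvValsB pvValsT pvFlat at *
      rw [List.flatMap_cons, List.filter_append, List.map_append, ← ih, pvTr_filter]
      rw [List.filterMap_cons]
      cases hg : (PySem.Dict.ofList m.2).get? k with
      | none => simp
      | some v => simp

-- ===== VERDICT (by name: the statement is the Claim_ definition above) =====
theorem convert_scraped_data_spec : Claim_equal_convert_scraped_data := by
  unfold Claim_equal_convert_scraped_data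
  intro scraped _
  unfold Spec_convert_scraped_data
  rw [pvA_eq_foldT, pvFoldT_canon]
  unfold convert_scraped_data_alt
  have hnd : (pvKeysB scraped).Nodup := by
    rw [pvKeysB_eq]; exact pvNodup_keysT [] _ List.nodup_nil
  have hfresh : ((pvKeysB scraped).foldl
        (fun result k => result.insert k [pvMonthsB scraped k, pvValsB scraped k])
        PySem.Dict.empty).items
      = (pvKeysB scraped).map
          (fun k => (k, [pvMonthsB scraped k, pvValsB scraped k])) := by
    have h := PySem.Dict.items_foldl_insert_fresh (pvKeysB scraped) (fun k => k)
      (fun k => [pvMonthsB scraped k, pvValsB scraped k]) PySem.Dict.empty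
      (fun _ _ => rfl) (by simpa using hnd)
    simpa using h
  rw [hfresh]
  unfold pvCanon
  rw [← pvKeysB_eq]
  refine (List.map_congr_left (fun k _ => ?_)).symm
  rw [← pvMonthsB_eq, ← pvValsB_eq]
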